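-- pv_equiv track=rewrite | github.com/Adamssss/projectEuler | pb105.py | allsub
-- ===== SOURCE A (Python) =====
-- def exactsub(oset):
--     l = len(oset)
--     if l == 2:
--         return [[[oset[0]],[oset[1]]]]
--     result = []
--     f = oset[0]
--     rest = oset[1:]
--     result.append([[f],rest])
--     for i in exactsub(rest):
--         a = i[0]
--         b = i[1]
--         result.append([a+[f],b])
--         result.append([a,b+[f]])
--     return result
--
-- def allsub(oset):
--     temp = exactsub(oset)
--     result = temp[:]
--     for i in temp:
--         if len(i[0]) > 1:
--             result += exactsub(i[0])
--         if len(i[1]) > 1: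
--             result += exactsub(i[1])
--     return result
-- ===== SOURCE B (Python) =====
-- # Iterative bottom-up version: exactsub is computed by folding right-to-left
-- # over the elements in front of the last two, instead of recursing on the tail.
-- def _exactsub_iter(oset):
--     parts = [[[oset[-2]], [oset[-1]]]]
--     rest = oset[-2:]
--     for f in reversed(oset[:-2]):
--         new = [[[f], rest]]
--         for a, b in parts:
--             new.append([a + [f], b])
--             new.append([a, b + [f]])
--         parts = new
--         rest = [f] + rest
--     return parts
--
-- def allsub(oset):
--     temp = _exactsub_iter(oset)
--     return temp + [p for a, b in temp
--                    for p in (_exactsub_iter(a) if len(a) > 1 else [])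
--                            + (_exactsub_iter(b) if len(b) > 1 else [])]
-- ===== Notes on version B (the rewrite author's own statement) =====
-- stated objective: alternative
-- what changed: exactsub's recursion on the tail is replaced by a single right-to-left fold over oset[:-2] that builds the partition list bottom-up from the last two elements, and allsub's accumulating loop is replaced by a flat comprehension appended to temp.
import Mathlib
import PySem

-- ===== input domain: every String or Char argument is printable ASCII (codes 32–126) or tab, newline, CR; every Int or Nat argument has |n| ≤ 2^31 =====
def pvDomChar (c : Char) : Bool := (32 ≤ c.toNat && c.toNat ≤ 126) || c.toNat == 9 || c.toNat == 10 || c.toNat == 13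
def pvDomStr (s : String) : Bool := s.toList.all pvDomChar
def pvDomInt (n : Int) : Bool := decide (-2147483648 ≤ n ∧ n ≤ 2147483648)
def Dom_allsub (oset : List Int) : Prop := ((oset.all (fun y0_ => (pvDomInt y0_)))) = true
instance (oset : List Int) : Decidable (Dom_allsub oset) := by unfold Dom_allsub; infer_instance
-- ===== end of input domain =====

-- B replaces exactsub's recursion on the tail by a single right-to-left fold that
-- builds the partition list bottom-up (objective: alternative decomposition, same cost).
-- Both A and B raise IndexError on lists shorter than 2; Pre_ excludes those.

-- ===== PORT A =====
-- i[0] / i[1] on a partition i (always a 2-element list); the default is never reached.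
def pvPart1 (i : List (List Int)) : List Int := PySem.List.pyGetD i 0 []
def pvPart2 (i : List (List Int)) : List Int := PySem.List.pyGetD i 1 []

-- the shared inner loop body of both Pythons:
-- new = [[[f],rest]]; for a,b in parts: new += [[a+[f],b],[a,b+[f]]]
def pvStep (f : Int) (rest : List Int) (parts : List (List (List Int))) :
    List (List (List Int)) :=
  parts.foldl
    (fun res i => res ++ [[pvPart1 i ++ [f], pvPart2 i], [pvPart1 i, pvPart2 i ++ [f]]])
    [[[f], rest]]

def exactsubA : List Int → List (List (List Int))
  | [] => []          -- Python: oset[0] raises IndexError; outside Pre_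
  | f :: rest =>
    if (f :: rest).length = 2 then
      [[[f], rest]]   -- = [[[oset[0]],[oset[1]]]] since rest = [oset[1]] here
    else
      pvStep f rest (exactsubA rest)

def allsub (oset : List Int) : List (List (List Int)) :=
  let temp := exactsubA oset
  temp.foldl
    (fun result i =>
      let r1 := if (pvPart1 i).length > 1 then result ++ exactsubA (pvPart1 i) else result
      if (pvPart2 i).length > 1 then r1 ++ exactsubA (pvPart2 i) else r1)
    temp

-- ===== PORT B =====
-- iterative exactsub: fold right-to-left over oset[:-2], state = (parts, rest)
def exactsubB (oset : List Int) : List (List (List Int)) :=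
  -- oset[-2], oset[-1] raise IndexError in Python for len < 2; outside Pre_
  let parts0 : List (List (List Int)) :=
    [[[PySem.List.pyGetD oset (-2) 0], [PySem.List.pyGetD oset (-1) 0]]]
  let rest0 := PySem.List.slice oset (some (-2)) none
  ((PySem.List.slice oset none (some (-2))).reverse).foldl
    (fun (st : List (List (List Int)) × List Int) f =>
      (pvStep f st.2 st.1, f :: st.2))
    (parts0, rest0) |>.1

def allsub_alt (oset : List Int) : List (List (List Int)) :=
  let temp := exactsubB oset
  temp ++ temp.flatMap (fun i =>
    (if (pvPart1 i).length > 1 then exactsubB (pvPart1 i) else []) ++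
    (if (pvPart2 i).length > 1 then exactsubB (pvPart2 i) else []))

-- ===== PRECONDITION & SPEC =====
-- Pre_ excludes lists with fewer than 2 elements, on which both Pythons raise IndexError.
def Pre_allsub (oset : List Int) : Prop := 2 ≤ oset.length
instance (oset : List Int) : Decidable (Pre_allsub oset) := by unfold Pre_allsub; infer_instance
def pvWitness_allsub : List Int := [1, 2, 3]

def Spec_allsub (oset : List Int) (out : List (List (List Int))) : Prop := out = allsub_alt oset
instance (oset : List Int) (out : List (List (List Int))) : Decidable (Spec_allsub oset out) := by unfold Spec_allsub; infer_instance

-- ===== CLAIM (what is proved, stated in full; the proofs are below) =====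
def Claim_equal_allsub : Prop := ∀ (oset : List Int), Dom_allsub oset → Pre_allsub oset → Spec_allsub oset (allsub oset)


-- ===== LEMMAS AND PROOFS =====

theorem pvGetD_cons_neg2 (x : Int) (t : List Int) (h : 2 ≤ t.length) :
    PySem.List.pyGetD (x::t) (-2) 0 = PySem.List.pyGetD t (-2) 0 := by
  rw [PySem.List.pyGetD_neg_ofNat (x::t) 2 0 (by omega) (by simp; omega),
      PySem.List.pyGetD_neg_ofNat t 2 0 (by omega) (by omega)]
  have h1 : (x::t).length - 2 = (t.length - 2) + 1 := by simp; omega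
  simp only [h1, List.getElem_cons_succ]

theorem pvGetD_cons_neg1 (x : Int) (t : List Int) (h : 2 ≤ t.length) :
    PySem.List.pyGetD (x::t) (-1) 0 = PySem.List.pyGetD t (-1) 0 := by
  rw [PySem.List.pyGetD_neg_ofNat (x::t) 1 0 (by omega) (by simp),
      PySem.List.pyGetD_neg_ofNat t 1 0 (by omega) (by omega)]
  have h1 : (x::t).length - 1 = (t.length - 1) + 1 := by simp; omega
  simp only [h1, List.getElem_cons_succ]

theorem pvSlice_to_cons (x : Int) (t : List Int) (h : 2 ≤ t.length) :
    PySem.List.slice (x::t) none (some (-2)) = x :: PySem.List.slice t none (some (-2)) := by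
  rw [PySem.List.slice_to_neg_ofNat _ 2 (by omega), PySem.List.slice_to_neg_ofNat _ 2 (by omega)]
  have h1 : (x::t).length - 2 = (t.length - 2) + 1 := by simp; omega
  simp only [h1, List.take_succ_cons]

theorem pvSlice_from_cons (x : Int) (t : List Int) (h : 2 ≤ t.length) :
    PySem.List.slice (x::t) (some (-2)) none = PySem.List.slice t (some (-2)) none := by
  rw [PySem.List.slice_from_neg_ofNat _ 2 (by omega), PySem.List.slice_from_neg_ofNat _ 2 (by omega)]
  have h1 : (x::t).length - 2 = (t.length - 2) + 1 := by simp; omega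
  simp only [h1, List.drop_succ_cons]

-- the fold of exactsubB, run over reverse(l[:-2]) from B's initial state, ends at (exactsubA l, l)
theorem pvLoop_spec : ∀ (l : List Int), 2 ≤ l.length →
    ((PySem.List.slice l none (some (-2))).reverse).foldl
      (fun (st : List (List (List Int)) × List Int) f => (pvStep f st.2 st.1, f :: st.2))
      ([[[PySem.List.pyGetD l (-2) 0], [PySem.List.pyGetD l (-1) 0]]],
       PySem.List.slice l (some (-2)) none)
    = (exactsubA l, l) := by
  intro l
  induction l with
  | nil => intro h; simp at h
  | cons x t ih =>
    intro h
    by_cases ht : 2 ≤ t.length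
    · have h3 : ¬ ((x::t).length = 2) := by simp; omega
      rw [pvGetD_cons_neg2 x t ht, pvGetD_cons_neg1 x t ht, pvSlice_from_cons x t ht,
          pvSlice_to_cons x t ht]
      rw [List.reverse_cons, List.foldl_append, ih ht]
      simp only [List.foldl_cons, List.foldl_nil]
      rw [exactsubA]
      simp only [List.length_cons]
      rw [if_neg (by omega : ¬ t.length + 1 = 2)]
    · have h1 : t.length = 1 := by simp at h; omega
      obtain ⟨y, rfl⟩ := List.length_eq_one_iff.mp h1
      rw [PySem.List.slice_to_neg_ofNat _ 2 (by omega), PySem.List.slice_from_neg_ofNat _ 2 (by omega)]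
      have g2 : PySem.List.pyGetD [x,y] (-2) 0 = x := by
        simp [PySem.List.pyGetD, PySem.List.pyGet?, PySem.List.pyIdx?]
      have g1 : PySem.List.pyGetD [x,y] (-1) 0 = y := by
        simp [PySem.List.pyGetD, PySem.List.pyGet?, PySem.List.pyIdx?]
      rw [g2, g1]
      simp [exactsubA]

theorem pvExactsub_eq (l : List Int) (h : 2 ≤ l.length) : exactsubB l = exactsubA l := by
  unfold exactsubB
  exact congrArg Prod.fst (pvLoop_spec l h)

-- A's allsub loop body appends a block per element: fold = temp ++ flatMap
theorem pvFoldl_append_flatMap (g : List (List Int) → List (List (List Int)))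
    (l : List (List (List Int))) (init : List (List (List Int))) :
    l.foldl (fun r i => r ++ g i) init = init ++ l.flatMap g := by
  induction l generalizing init with
  | nil => simp
  | cons a l ih => simp [List.foldl_cons, ih, List.flatMap_cons]

-- ===== VERDICT (by name: the statement is the Claim_ definition above) =====
theorem allsub_spec : Claim_equal_allsub := by
  intro oset _ hpre
  unfold Spec_allsub allsub allsub_alt
  rw [pvExactsub_eq oset hpre]
  have hbody : ∀ (result : List (List (List Int))) (i : List (List Int)),
      (let r1 := if (pvPart1 i).length > 1 then result ++ exactsubA (pvPart1 i) else result
       if (pvPart2 i).length > 1 then r1 ++ exactsubA (pvPart2 i) else r1)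
      = result ++ ((if (pvPart1 i).length > 1 then exactsubB (pvPart1 i) else []) ++
                   (if (pvPart2 i).length > 1 then exactsubB (pvPart2 i) else [])) := by
    intro result i
    split_ifs with h1 h2 h2 <;>
      first
      | simp [pvExactsub_eq _ (by omega : 2 ≤ (pvPart1 i).length),
              pvExactsub_eq _ (by omega : 2 ≤ (pvPart2 i).length)]
      | simp [pvExactsub_eq _ (by omega : 2 ≤ (pvPart1 i).length)]
      | simp [pvExactsub_eq _ (by omega : 2 ≤ (pvPart2 i).length)]
      | simp
  simp only [hbody]
  exact pvFoldl_append_flatMap _ _ _
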